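-- pv_equiv track=rewrite | github.com/dmnlabsdevteam/coordinator | reasoning/hierarchical_abstraction.py | _share_concept_category
-- ===== SOURCE A (Python) =====
-- from typing import Dict, Any, List, Optional, Set, Tuple
--
-- def _share_concept_category(entities1: List[str], entities2: List[str]) -> bool:
--     """Check if entities share conceptual categories"""
--     categories = {
--         'programming': {'python', 'java', 'javascript', 'code', 'program', 'function', 'class', 'method'},
--         'data': {'data', 'analysis', 'dataframe', 'dataset', 'table', 'query', 'database'},
--         'tools': {'library', 'framework', 'tool', 'package', 'module', 'system'},
--         'concepts': {'algorithm', 'pattern', 'structure', 'design', 'architecture'}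
--     }
--
--     def categorize(entity: str) -> Set[str]:
--         matches = set()
--         entity_lower = entity.lower()
--         for category, keywords in categories.items():
--             if entity_lower in keywords or any(kw in entity_lower for kw in keywords):
--                 matches.add(category)
--         return matches
--
--     cats1 = set()
--     for e in entities1:
--         cats1.update(categorize(e))
--
--     cats2 = set()
--     for e in entities2:
--         cats2.update(categorize(e))
--
--     return len(cats1 & cats2) > 0
-- ===== SOURCE B (Python) =====
-- def _share_concept_category(entities1, entities2):
--     """Category-first scan: a category is shared iff some entity on each side
--     contains one of its keywords; return True on the first such category."""
--     keyword_groups = [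
--         ['python', 'java', 'javascript', 'code', 'program', 'function', 'class', 'method'],
--         ['data', 'analysis', 'dataframe', 'dataset', 'table', 'query', 'database'],
--         ['library', 'framework', 'tool', 'package', 'module', 'system'],
--         ['algorithm', 'pattern', 'structure', 'design', 'architecture'],
--     ]
--     for kws in keyword_groups:
--         if any(kw in e.lower() for e in entities1 for kw in kws) and \
--            any(kw in e.lower() for e in entities2 for kw in kws):
--             return True
--     return False
-- ===== Notes on version B (the rewrite author's own statement) =====
-- stated objective: simpler
-- what changed: B iterates category-first with short-circuit any() substring tests on each entity list and returns on the first category matched by both sides, instead of building a category set per entity, accumulating two sets and intersecting them; the exact-membership check is dropped because it is subsumed by the substring check.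
import Mathlib
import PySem

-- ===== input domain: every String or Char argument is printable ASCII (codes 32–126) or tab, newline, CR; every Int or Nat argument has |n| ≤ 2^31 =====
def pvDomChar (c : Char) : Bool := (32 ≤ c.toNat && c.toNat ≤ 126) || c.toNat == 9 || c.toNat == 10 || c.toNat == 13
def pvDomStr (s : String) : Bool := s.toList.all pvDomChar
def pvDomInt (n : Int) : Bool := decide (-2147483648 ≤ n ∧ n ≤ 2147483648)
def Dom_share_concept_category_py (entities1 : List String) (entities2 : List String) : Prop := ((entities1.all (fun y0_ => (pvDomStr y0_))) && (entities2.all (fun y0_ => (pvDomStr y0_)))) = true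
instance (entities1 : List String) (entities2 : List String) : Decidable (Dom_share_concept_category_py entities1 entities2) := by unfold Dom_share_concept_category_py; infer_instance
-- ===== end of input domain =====

-- B scans category-first: for each keyword group it tests both entity lists directly and returns on the first shared category, instead of building per-entity category sets and intersecting them (objective: simpler; the exact-membership test of A is subsumed by its substring test).


-- ===== PORT A =====
-- the literal dict of categories; only iterated (in insertion order) — ported as its items list
def pvCategories : List (String × PySem.Set String) :=
  [("programming", PySem.Set.ofList ["python", "java", "javascript", "code", "program", "function", "class", "method"]),
   ("data", PySem.Set.ofList ["data", "analysis", "dataframe", "dataset", "table", "query", "database"]),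
   ("tools", PySem.Set.ofList ["library", "framework", "tool", "package", "module", "system"]),
   ("concepts", PySem.Set.ofList ["algorithm", "pattern", "structure", "design", "architecture"])]

def pvCategorize (entity : String) : PySem.Set String :=
  let entity_lower := PySem.Str.lower entity
  pvCategories.foldl
    (fun acc p =>
      if PySem.Set.contains p.2 entity_lower || p.2.any (fun kw => PySem.Str.isIn kw entity_lower) then
        PySem.Set.add acc p.1
      else acc)
    PySem.Set.empty

def share_concept_category_py (entities1 : List String) (entities2 : List String) : Bool :=
  let cats1 := entities1.foldl (fun s e => PySem.Set.update s (pvCategorize e)) PySem.Set.empty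
  let cats2 := entities2.foldl (fun s e => PySem.Set.update s (pvCategorize e)) PySem.Set.empty
  decide (0 < (PySem.Set.inter cats1 cats2).length)

-- ===== PORT B =====
def pvKeywordGroups : List (List String) :=
  [["python", "java", "javascript", "code", "program", "function", "class", "method"],
   ["data", "analysis", "dataframe", "dataset", "table", "query", "database"],
   ["library", "framework", "tool", "package", "module", "system"],
   ["algorithm", "pattern", "structure", "design", "architecture"]]

def share_concept_category_py_alt (entities1 : List String) (entities2 : List String) : Bool :=
  pvKeywordGroups.any (fun kws =>
    entities1.any (fun e => kws.any (fun kw => PySem.Str.isIn kw (PySem.Str.lower e))) &&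
    entities2.any (fun e => kws.any (fun kw => PySem.Str.isIn kw (PySem.Str.lower e))))

-- ===== PRECONDITION & SPEC =====
def Spec_share_concept_category_py (entities1 : List String) (entities2 : List String) (out : Bool) : Prop := out = share_concept_category_py_alt entities1 entities2
instance (entities1 : List String) (entities2 : List String) (out : Bool) : Decidable (Spec_share_concept_category_py entities1 entities2 out) := by unfold Spec_share_concept_category_py; infer_instance

-- ===== CLAIM (what is proved, stated in full; the proofs are below) =====
def Claim_equal_share_concept_category_py : Prop := ∀ (entities1 : List String) (entities2 : List String), Dom_share_concept_category_py entities1 entities2 → Spec_share_concept_category_py entities1 entities2 (share_concept_category_py entities1 entities2)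

-- ===== LEMMAS AND PROOFS =====
-- membership in the accumulator of A's per-entity category loop
theorem pv_mem_foldl_if_add {α : Type} (cats : List (String × α)) (f : String × α → Bool)
    (acc : PySem.Set String) (c : String) :
    c ∈ cats.foldl (fun m p => if f p then PySem.Set.add m p.1 else m) acc ↔
      c ∈ acc ∨ ∃ p ∈ cats, p.1 = c ∧ f p = true := by
  induction cats generalizing acc with
  | nil => simp
  | cons p rest ih =>
    simp only [List.foldl_cons, List.mem_cons]
    by_cases h : f p = true
    · simp [h, ih, PySem.Set.mem_add]
      tauto
    · simp only [Bool.not_eq_true] at h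
      simp [h, ih]

-- the exact-membership disjunct of A's test is subsumed by the substring disjunct
theorem pv_contains_or_any (s : PySem.Set String) (el : String) :
    (PySem.Set.contains s el || s.any (fun kw => PySem.Str.isIn kw el)) =
      s.any (fun kw => PySem.Str.isIn kw el) := by
  cases h : PySem.Set.contains s el with
  | false => simp
  | true =>
    have hm : el ∈ s := (PySem.Set.contains_iff s el).mp h
    simp only [Bool.true_or]
    symm
    rw [List.any_eq_true]
    exact ⟨el, hm, (PySem.Str.isIn_iff_infix el el).mpr (List.infix_refl _)⟩

theorem pv_mem_categorize (e c : String) :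
    c ∈ pvCategorize e ↔
      ∃ p ∈ pvCategories, p.1 = c ∧ p.2.any (fun kw => PySem.Str.isIn kw (PySem.Str.lower e)) = true := by
  unfold pvCategorize
  rw [pv_mem_foldl_if_add]
  constructor
  · rintro (h | h)
    · simp [PySem.Set.empty] at h
    · rcases h with ⟨p, hp, hc, hf⟩
      rw [pv_contains_or_any] at hf
      exact ⟨p, hp, hc, hf⟩
  · rintro ⟨p, hp, hc, hf⟩
    right
    exact ⟨p, hp, hc, by rw [pv_contains_or_any]; exact hf⟩

-- membership in A's cats1 / cats2 accumulation
theorem pv_mem_foldl_update (entities : List String) (acc : PySem.Set String) (c : String) :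
    c ∈ entities.foldl (fun s e => PySem.Set.update s (pvCategorize e)) acc ↔
      c ∈ acc ∨ ∃ e ∈ entities, c ∈ pvCategorize e := by
  induction entities generalizing acc with
  | nil => simp
  | cons e rest ih =>
    simp only [List.foldl_cons, List.mem_cons]
    rw [ih]
    simp only [PySem.Set.mem_update]
    constructor
    · rintro ((h | h) | ⟨e', he', h⟩)
      · exact Or.inl h
      · exact Or.inr ⟨e, Or.inl rfl, h⟩
      · exact Or.inr ⟨e', Or.inr he', h⟩
    · rintro (h | ⟨e', he', h⟩)
      · exact Or.inl (Or.inl h)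
      · rcases he' with rfl | he'
        · exact Or.inl (Or.inr h)
        · exact Or.inr ⟨e', he', h⟩

-- B's per-side test, as an existential
theorem pv_alt_side (entities : List String) (kws : List String) :
    entities.any (fun e => kws.any (fun kw => PySem.Str.isIn kw (PySem.Str.lower e))) = true ↔
      ∃ e ∈ entities, kws.any (fun kw => PySem.Str.isIn kw (PySem.Str.lower e)) = true := by
  rw [List.any_eq_true]

-- ===== VERDICT (by name: the statement is the Claim_ definition above) =====
theorem share_concept_category_py_spec : Claim_equal_share_concept_category_py := by
  intro entities1 entities2 _
  unfold Spec_share_concept_category_py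
  rw [Bool.eq_iff_iff]
  unfold share_concept_category_py share_concept_category_py_alt
  simp only [decide_eq_true_eq]
  rw [List.length_pos_iff_exists_mem]
  constructor
  · rintro ⟨c, hc⟩
    rw [PySem.Set.mem_inter] at hc
    obtain ⟨h1, h2⟩ := hc
    rw [pv_mem_foldl_update] at h1 h2
    rcases h1 with h1 | ⟨e1, he1, hc1⟩
    · simp [PySem.Set.empty] at h1
    rcases h2 with h2 | ⟨e2, he2, hc2⟩
    · simp [PySem.Set.empty] at h2
    rw [pv_mem_categorize] at hc1 hc2
    obtain ⟨p, hp, hpc, hf1⟩ := hc1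
    obtain ⟨q, hq, hqc, hf2⟩ := hc2
    have hpq : p = q := by
      subst hpc
      revert hq
      fin_cases hp <;> (intro hq; fin_cases hq <;> simp_all)
    subst hpq
    rw [List.any_eq_true]
    refine ⟨p.2, ?_, ?_⟩
    · revert hp; unfold pvCategories pvKeywordGroups; intro hp; fin_cases hp <;> decide
    · rw [Bool.and_eq_true, pv_alt_side, pv_alt_side]
      exact ⟨⟨e1, he1, hf1⟩, ⟨e2, he2, hf2⟩⟩
  · intro h
    rw [List.any_eq_true] at h
    obtain ⟨kws, hkws, hb⟩ := h
    rw [Bool.and_eq_true, pv_alt_side, pv_alt_side] at hb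
    obtain ⟨⟨e1, he1, hf1⟩, ⟨e2, he2, hf2⟩⟩ := hb
    have hcat : ∃ p ∈ pvCategories, p.2 = kws := by
      revert hkws; unfold pvCategories pvKeywordGroups; intro hkws
      fin_cases hkws
      · exact ⟨("programming", PySem.Set.ofList ["python", "java", "javascript", "code", "program", "function", "class", "method"]), by decide, by decide⟩
      · exact ⟨("data", PySem.Set.ofList ["data", "analysis", "dataframe", "dataset", "table", "query", "database"]), by decide, by decide⟩
      · exact ⟨("tools", PySem.Set.ofList ["library", "framework", "tool", "package", "module", "system"]), by decide, by decide⟩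
      · exact ⟨("concepts", PySem.Set.ofList ["algorithm", "pattern", "structure", "design", "architecture"]), by decide, by decide⟩
    obtain ⟨p, hp, hpk⟩ := hcat
    refine ⟨p.1, ?_⟩
    rw [PySem.Set.mem_inter, pv_mem_foldl_update, pv_mem_foldl_update]
    constructor
    · exact Or.inr ⟨e1, he1, (pv_mem_categorize e1 p.1).mpr ⟨p, hp, rfl, by rw [hpk]; exact hf1⟩⟩
    · exact Or.inr ⟨e2, he2, (pv_mem_categorize e2 p.1).mpr ⟨p, hp, rfl, by rw [hpk]; exact hf2⟩⟩
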